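-- pv_equiv track=rewrite | github.com/gimdongwon/Catch_python_tmi | Woojin/6th/exterior-wall-check/solution.py | get_dist_matrix
-- ===== SOURCE A (Python) =====
-- def get_dist_matrix(weak):
--     n = len(weak)
--     matrix = [[0] * n for _ in range(n)]
--
--     for i in range(n):
--         for j in range(i + 1, n):
--             matrix[i][j] = weak[j] - weak[i]
--
--     for i in range(n):
--         for j in range(i):
--             matrix[i][j] = 12 - matrix[j][i]
--
--     return matrix
-- ===== SOURCE B (Python) =====
-- def get_dist_matrix(weak):
--     # Each row i is assembled from two shifted slices of weak: the prefix
--     # weak[:i] shifted by -weak[i]+12 and the suffix weak[i:] shifted by -weak[i].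
--     return [[x - wi + 12 for x in weak[:i]] + [x - wi for x in weak[i:]]
--             for i, wi in enumerate(weak)]
-- ===== Notes on version B (the rewrite author's own statement) =====
-- stated objective: alternative
-- what changed: B assembles each row directly by concatenating two shifted slices of weak (prefix shifted by -weak[i]+12, suffix by -weak[i]), replacing A's pre-allocated mutable matrix filled by two dependent passes where the lower triangle is read back from the already-filled upper triangle.
import Mathlib
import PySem

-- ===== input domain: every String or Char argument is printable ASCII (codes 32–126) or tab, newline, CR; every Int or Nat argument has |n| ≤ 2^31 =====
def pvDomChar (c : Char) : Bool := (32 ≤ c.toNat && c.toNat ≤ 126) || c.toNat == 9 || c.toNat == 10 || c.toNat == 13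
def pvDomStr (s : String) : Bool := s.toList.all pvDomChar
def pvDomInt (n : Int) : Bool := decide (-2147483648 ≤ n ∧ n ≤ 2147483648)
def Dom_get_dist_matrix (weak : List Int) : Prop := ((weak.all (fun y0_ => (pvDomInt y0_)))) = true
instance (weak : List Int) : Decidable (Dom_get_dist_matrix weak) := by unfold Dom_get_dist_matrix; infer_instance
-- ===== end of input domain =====

-- B assembles each row from two shifted slices of weak (prefix +12, suffix), instead of
-- A's two dependent mutation passes over a pre-allocated matrix (objective: alternative).


-- ===== PORT A =====
-- matrix[i][j] = v  (Python list-of-lists assignment; indices are always in range here)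
def pvSet2 (m : List (List Int)) (i j : Nat) (v : Int) : List (List Int) :=
  m.set i ((m.getD i []).set j v)

def get_dist_matrix (weak : List Int) : List (List Int) :=
  let n := weak.length
  let matrix := (List.range n).map (fun _ => List.replicate n (0 : Int))
  -- first pass: upper triangle from weak
  let matrix := (List.range n).foldl (fun m i =>
    (List.range' (i + 1) (n - (i + 1))).foldl
      (fun m j => pvSet2 m i j (weak.getD j 0 - weak.getD i 0)) m) matrix
  -- second pass: lower triangle read back from the upper triangle of the matrix being built
  (List.range n).foldl (fun m i =>
    (List.range i).foldl
      (fun m j => pvSet2 m i j (12 - (m.getD j []).getD i 0)) m) matrix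

-- ===== PORT B =====
-- row i = [x - wi + 12 for x in weak[:i]] + [x - wi for x in weak[i:]], over enumerate(weak)
def get_dist_matrix_alt (weak : List Int) : List (List Int) :=
  (PySem.List.enumerate weak).map (fun p =>
    (PySem.List.slice weak none (some p.1)).map (fun x => x - p.2 + 12) ++
    (PySem.List.slice weak (some p.1) none).map (fun x => x - p.2))

-- ===== PRECONDITION & SPEC =====
def Spec_get_dist_matrix (weak : List Int) (out : List (List Int)) : Prop := out = get_dist_matrix_alt weak
instance (weak : List Int) (out : List (List Int)) : Decidable (Spec_get_dist_matrix weak out) := by unfold Spec_get_dist_matrix; infer_instance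

-- ===== CLAIM (what is proved, stated in full; the proofs are below) =====
def Claim_equal_get_dist_matrix : Prop := ∀ (weak : List Int), Dom_get_dist_matrix weak → Spec_get_dist_matrix weak (get_dist_matrix weak)

-- ===== LEMMAS AND PROOFS =====

-- entry (a,b) of the matrix, and the rectangular-shape invariant
def pvEntry (m : List (List Int)) (a b : Nat) : Int := (m.getD a []).getD b 0

def pvShape (n : Nat) (m : List (List Int)) : Prop :=
  m.length = n ∧ ∀ a, a < n → (m.getD a []).length = n

theorem pv_getD_set {α : Type} (l : List α) (i a : Nat) (x d : α) :
    (l.set i x).getD a d = if i = a ∧ a < l.length then x else l.getD a d := by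
  rcases Nat.lt_or_ge a l.length with h | h
  · rw [List.getD_eq_getElem _ _ (by simpa using h), List.getElem_set]
    split_ifs with h1 h2 h3 <;> simp_all
  · rw [List.getD_eq_default _ _ (by simpa using h), List.getD_eq_default _ _ h]
    simp; omega

theorem pv_getD_replicate {α : Type} (n a : Nat) (x d : α) :
    (List.replicate n x).getD a d = if a < n then x else d := by
  rcases Nat.lt_or_ge a n with h | h
  · rw [List.getD_eq_getElem _ _ (by simpa using h), List.getElem_replicate, if_pos h]
  · rw [List.getD_eq_default _ _ (by simpa using h), if_neg (by omega)]

theorem pvShape_set2 {n : Nat} {m : List (List Int)} (h : pvShape n m)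
    (i j : Nat) (v : Int) : pvShape n (pvSet2 m i j v) := by
  obtain ⟨hlen, hrow⟩ := h
  refine ⟨by simp [pvSet2, hlen], ?_⟩
  intro a ha
  rw [pvSet2, pv_getD_set]
  split_ifs with hc
  · obtain ⟨h1, h2⟩ := hc
    subst h1
    rw [List.length_set]
    exact hrow i (hlen ▸ h2)
  · exact hrow a ha

theorem pvEntry_set2 {n : Nat} {m : List (List Int)} (h : pvShape n m)
    {i j : Nat} (hi : i < n) (hj : j < n) (v : Int) (a b : Nat) :
    pvEntry (pvSet2 m i j v) a b = if i = a ∧ j = b then v else pvEntry m a b := by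
  obtain ⟨hlen, hrow⟩ := h
  rw [pvEntry, pvSet2, pv_getD_set]
  split_ifs with h1 h2 h3
  · rw [pv_getD_set]
    rw [if_pos ⟨h2.2, by rw [hrow i hi]; omega⟩]
  · rw [pv_getD_set, if_neg (by rw [h1.1]; tauto), pvEntry, h1.1]
  · exact absurd ⟨h3.1, by omega⟩ h1
  · rfl

-- initial matrix: all zeros, rectangular
theorem pvGetD_init (n a : Nat) :
    ((List.range n).map (fun _ => List.replicate n (0 : Int))).getD a []
      = if a < n then List.replicate n (0 : Int) else [] := by
  rcases Nat.lt_or_ge a n with h | h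
  · rw [List.getD_eq_getElem _ _ (by simpa using h), if_pos h]
    simp
  · rw [List.getD_eq_default _ _ (by simpa using h), if_neg (by omega)]

theorem pvShape_init (n : Nat) :
    pvShape n ((List.range n).map (fun _ => List.replicate n (0 : Int))) := by
  refine ⟨by simp, ?_⟩
  intro a ha
  rw [pvGetD_init, if_pos ha, List.length_replicate]

theorem pvEntry_init (n : Nat) (a b : Nat) :
    pvEntry ((List.range n).map (fun _ => List.replicate n (0 : Int))) a b = 0 := by
  rw [pvEntry, pvGetD_init]
  split_ifs with h
  · rw [pv_getD_replicate]
    split_ifs <;> rfl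
  · rfl

-- first pass, inner loop over a list of columns L in row i
theorem pv_phase1_inner (weak : List Int) {n : Nat}
    {i : Nat} (hi : i < n) (L : List Nat) (hL : ∀ j ∈ L, j < n)
    {m : List (List Int)} (hm : pvShape n m) :
    pvShape n (L.foldl (fun m j => pvSet2 m i j (weak.getD j 0 - weak.getD i 0)) m) ∧
    ∀ a b, pvEntry (L.foldl (fun m j => pvSet2 m i j (weak.getD j 0 - weak.getD i 0)) m) a b
      = if a = i ∧ b ∈ L then weak.getD b 0 - weak.getD i 0 else pvEntry m a b := by
  induction L generalizing m with
  | nil => exact ⟨hm, by simp⟩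
  | cons j L ih =>
    have hj : j < n := hL j (by simp)
    have hm' := pvShape_set2 hm i j (weak.getD j 0 - weak.getD i 0)
    obtain ⟨hs, he⟩ := ih (fun x hx => hL x (by simp [hx])) hm'
    refine ⟨hs, ?_⟩
    intro a b
    rw [List.foldl_cons, he a b, pvEntry_set2 hm hi hj]
    by_cases hai : a = i
    · subst hai
      by_cases hbL : b ∈ L
      · simp [hbL]
      · by_cases hbj : b = j
        · subst hbj; simp [hbL]
        · simp [hbL, hbj, show j ≠ b from fun h => hbj h.symm]
    · simp [hai, show i ≠ a from fun h => hai h.symm]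

-- first pass, outer loop: after the first k rows the upper triangle of rows < k is filled
theorem pv_phase1 (weak : List Int) {n : Nat} (hn : n = weak.length) (k : Nat) (hk : k ≤ n) :
    pvShape n ((List.range k).foldl (fun m i =>
        (List.range' (i + 1) (n - (i + 1))).foldl
          (fun m j => pvSet2 m i j (weak.getD j 0 - weak.getD i 0)) m)
        ((List.range n).map (fun _ => List.replicate n (0 : Int)))) ∧
    ∀ a b, pvEntry ((List.range k).foldl (fun m i =>
        (List.range' (i + 1) (n - (i + 1))).foldl
          (fun m j => pvSet2 m i j (weak.getD j 0 - weak.getD i 0)) m)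
        ((List.range n).map (fun _ => List.replicate n (0 : Int)))) a b
      = if a < k ∧ a < b ∧ b < n then weak.getD b 0 - weak.getD a 0 else 0 := by
  induction k with
  | zero => exact ⟨pvShape_init n, by simpa using fun a b => pvEntry_init n a b⟩
  | succ k ih =>
    obtain ⟨hs, he⟩ := ih (by omega)
    have hkn : k < n := by omega
    have hmem : ∀ j ∈ List.range' (k + 1) (n - (k + 1)), j < n := by
      intro j hj
      rw [List.mem_range'_1] at hj
      omega
    obtain ⟨hs', he'⟩ := pv_phase1_inner weak hkn _ hmem hs
    rw [List.range_succ, List.foldl_append, List.foldl_cons, List.foldl_nil]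
    refine ⟨hs', ?_⟩
    intro a b
    rw [he' a b, he a b]
    by_cases hak : a = k
    · subst hak
      by_cases hb : b ∈ List.range' (a + 1) (n - (a + 1))
      · have hb' := List.mem_range'_1.mp hb
        rw [if_pos ⟨rfl, hb⟩, if_pos (show a < a + 1 ∧ a < b ∧ b < n by omega)]
      · have hb2 : ¬(a + 1 ≤ b ∧ b < a + 1 + (n - (a + 1))) :=
          fun h => hb (List.mem_range'_1.mpr h)
        rw [if_neg (fun h => hb h.2), if_neg (by omega), if_neg (by omega)]
    · rw [if_neg (by tauto)]
      by_cases h : a < k ∧ a < b ∧ b < n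
      · rw [if_pos h, if_pos ⟨by omega, h.2⟩]
      · rw [if_neg h, if_neg (by omega)]

-- second pass, inner loop: row i < n, columns L ⊆ [0, i); the read cells (j, i) stay intact
theorem pv_phase2_inner (weak : List Int) {n : Nat} {i : Nat} (hi : i < n)
    (L : List Nat) (hL : ∀ j ∈ L, j < i)
    {m : List (List Int)} (hm : pvShape n m)
    (hread : ∀ j, j < i → pvEntry m j i = weak.getD i 0 - weak.getD j 0) :
    pvShape n (L.foldl (fun m j => pvSet2 m i j (12 - (m.getD j []).getD i 0)) m) ∧
    ∀ a b, pvEntry (L.foldl (fun m j => pvSet2 m i j (12 - (m.getD j []).getD i 0)) m) a b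
      = if a = i ∧ b ∈ L then 12 - (weak.getD i 0 - weak.getD b 0) else pvEntry m a b := by
  induction L generalizing m with
  | nil => exact ⟨hm, by simp⟩
  | cons j L ih =>
    have hj : j < i := hL j (by simp)
    have hv : (m.getD j []).getD i 0 = weak.getD i 0 - weak.getD j 0 := hread j hj
    have hm' := pvShape_set2 hm i j (12 - (m.getD j []).getD i 0)
    have hread' : ∀ j', j' < i →
        pvEntry (pvSet2 m i j (12 - (m.getD j []).getD i 0)) j' i
          = weak.getD i 0 - weak.getD j' 0 := by
      intro j' hj'
      rw [pvEntry_set2 hm hi (by omega), if_neg (by omega)]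
      exact hread j' hj'
    obtain ⟨hs, he⟩ := ih (fun x hx => hL x (by simp [hx])) hm' hread'
    refine ⟨hs, ?_⟩
    intro a b
    rw [List.foldl_cons, he a b, pvEntry_set2 hm hi (by omega), hv]
    by_cases hai : a = i
    · subst hai
      by_cases hbL : b ∈ L
      · simp [hbL]
      · by_cases hbj : b = j
        · subst hbj; simp [hbL]
        · simp [hbL, hbj, show j ≠ b from fun h => hbj h.symm]
    · simp [hai, show i ≠ a from fun h => hai h.symm]

-- the entry pattern after the whole first pass
def pvE1 (weak : List Int) (n a b : Nat) : Int :=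
  if a < b ∧ b < n then weak.getD b 0 - weak.getD a 0 else 0

-- second pass, outer loop
theorem pv_phase2 (weak : List Int) {n : Nat}
    {m : List (List Int)} (hm : pvShape n m)
    (hme : ∀ a b, pvEntry m a b = pvE1 weak n a b)
    (k : Nat) (hk : k ≤ n) :
    pvShape n ((List.range k).foldl (fun m i =>
        (List.range i).foldl (fun m j => pvSet2 m i j (12 - (m.getD j []).getD i 0)) m) m) ∧
    ∀ a b, pvEntry ((List.range k).foldl (fun m i =>
        (List.range i).foldl (fun m j => pvSet2 m i j (12 - (m.getD j []).getD i 0)) m) m) a b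
      = if a < k ∧ b < a then 12 - (weak.getD a 0 - weak.getD b 0) else pvE1 weak n a b := by
  induction k with
  | zero => exact ⟨hm, by simpa using hme⟩
  | succ k ih =>
    obtain ⟨hs, he⟩ := ih (by omega)
    have hkn : k < n := by omega
    have hread : ∀ j, j < k →
        pvEntry ((List.range k).foldl (fun m i =>
          (List.range i).foldl (fun m j => pvSet2 m i j (12 - (m.getD j []).getD i 0)) m) m) j k
          = weak.getD k 0 - weak.getD j 0 := by
      intro j hj
      rw [he j k, if_neg (by omega), pvE1, if_pos ⟨hj, hkn⟩]
    obtain ⟨hs', he'⟩ := pv_phase2_inner weak hkn (List.range k)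
      (fun j hj => List.mem_range.mp hj) hs hread
    rw [List.range_succ, List.foldl_append, List.foldl_cons, List.foldl_nil]
    refine ⟨hs', ?_⟩
    intro a b
    rw [he' a b, he a b]
    by_cases hak : a = k
    · subst hak
      by_cases hb : b < a
      · rw [if_pos ⟨rfl, List.mem_range.mpr hb⟩, if_pos (show a < a + 1 ∧ b < a by omega)]
      · rw [if_neg (fun h => hb (List.mem_range.mp h.2)), if_neg (by omega), if_neg (by omega)]
    · rw [if_neg (by tauto)]
      by_cases h : a < k ∧ b < a
      · rw [if_pos h, if_pos ⟨by omega, h.2⟩]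
      · rw [if_neg h, if_neg (by omega)]

-- full characterisation of port A's result
theorem get_dist_matrix_entry (weak : List Int) :
    pvShape weak.length (get_dist_matrix weak) ∧
    ∀ a b, pvEntry (get_dist_matrix weak) a b
      = if a < weak.length ∧ b < a then 12 - (weak.getD a 0 - weak.getD b 0)
        else pvE1 weak weak.length a b := by
  obtain ⟨hs1, he1⟩ := pv_phase1 weak rfl weak.length le_rfl
  have hme : ∀ a b, pvEntry ((List.range weak.length).foldl (fun m i =>
      (List.range' (i + 1) (weak.length - (i + 1))).foldl
        (fun m j => pvSet2 m i j (weak.getD j 0 - weak.getD i 0)) m)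
      ((List.range weak.length).map (fun _ => List.replicate weak.length (0 : Int)))) a b
      = pvE1 weak weak.length a b := by
    intro a b
    rw [he1 a b, pvE1]
    by_cases h : a < b ∧ b < weak.length
    · rw [if_pos ⟨by omega, h⟩, if_pos h]
    · rw [if_neg (by tauto), if_neg h]
  obtain ⟨hs2, he2⟩ := pv_phase2 weak hs1 hme weak.length le_rfl
  exact ⟨hs2, he2⟩

-- port B's row a, in take/drop form
theorem pv_alt_row (weak : List Int) (a : Nat) (ha : a < weak.length) :
    (get_dist_matrix_alt weak)[a]'(by simp [get_dist_matrix_alt, PySem.List.length_enumerate, ha])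
      = (weak.take a).map (fun x => x - weak[a] + 12) ++ (weak.drop a).map (fun x => x - weak[a]) := by
  simp only [get_dist_matrix_alt, List.getElem_map,
    PySem.List.getElem_enumerate, zero_add]
  rw [PySem.List.slice_to_natCast, PySem.List.slice_from_natCast]

-- ===== VERDICT (by name: the statement is the Claim_ definition above) =====
theorem get_dist_matrix_spec : Claim_equal_get_dist_matrix := by
  intro weak _
  rw [Spec_get_dist_matrix]
  obtain ⟨⟨hlen, hrow⟩, hent⟩ := get_dist_matrix_entry weak
  apply List.ext_getElem
  · simp [get_dist_matrix_alt, PySem.List.length_enumerate, hlen]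
  · intro a ha1 ha2
    have han : a < weak.length := by rwa [hlen] at ha1
    have h1 : (get_dist_matrix weak).getD a [] = (get_dist_matrix weak)[a] :=
      List.getD_eq_getElem _ _ ha1
    rw [pv_alt_row weak a han]
    have hta : (weak.take a).length = a := by simp; omega
    apply List.ext_getElem
    · rw [← h1, hrow a han]
      simp; omega
    · intro b hb1 hb2
      have hlena : (get_dist_matrix weak)[a].length = weak.length := by
        rw [← h1]; exact hrow a han
      have hbn : b < weak.length := by rwa [hlena] at hb1
      have hgd : pvEntry (get_dist_matrix weak) a b = (get_dist_matrix weak)[a][b] := by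
        rw [pvEntry, h1]
        exact List.getD_eq_getElem _ _ hb1
      rw [← hgd, hent a b]
      rcases Nat.lt_or_ge b a with hba | hba
      · rw [List.getElem_append_left (by rw [List.length_map, hta]; omega)]
        rw [if_pos ⟨han, hba⟩]
        simp only [List.getElem_map]
        rw [List.getElem_take, List.getD_eq_getElem _ _ han, List.getD_eq_getElem _ _ hbn]
        ring
      · rw [List.getElem_append_right (by rw [List.length_map, hta]; omega)]
        simp only [List.getElem_map, List.length_map, hta]
        rw [List.getElem_drop]
        have hab : a + (b - a) = b := by omega
        rw [if_neg (by omega), pvE1]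
        rcases Nat.lt_or_ge a b with h | h
        · rw [if_pos ⟨h, hbn⟩, List.getD_eq_getElem _ _ hbn, List.getD_eq_getElem _ _ han]
          simp only [show a + (b - a) = b from by omega]
        · have hab2 : a = b := by omega
          subst hab2
          rw [if_neg (by omega)]
          simp
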